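-- pv_equiv track=rewrite | github.com/pypi-data/pypi-mirror-170 | packages/stringtools/stringtools-2.1.2-py3-none-any.whl/stringtools/analysers.py | is_tautogram
-- ===== SOURCE A (Python) =====
-- from typing import Any, Dict, Union, Tuple, List
--
-- def is_tautogram(sentence: str) -> bool:
-- 	'''Checks if inputed string is a tautogram (A tautogram is a text in which all words start with the same letter.)
-- 	- is_tautogram("Crazy cat, cute, cuddly") -> True
-- 	- is_tautogram("Crazy mouse, cute, cuddly") -> False'''
--
-- 	words = sentence.lower().split() # Creating list of words
--
-- 	def __first_char(_list: List[str]): # Returns first alphabetic character from List[str]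
-- 		for word in _list:
-- 			if word[0].isalpha():
-- 				return word[0]
--
-- 	first_character = __first_char(words)
--
-- 	return all([False for word in words if word[0].isalpha() and word[0] != first_character])
-- ===== SOURCE B (Python) =====
-- def is_tautogram(sentence: str) -> bool:
--     letters = {word[0] for word in sentence.lower().split() if word[0].isalpha()}
--     return len(letters) <= 1
-- ===== Notes on version B (the rewrite author's own statement) =====
-- stated objective: simpler
-- what changed: Replaces the find-a-reference-first-letter helper plus a second comprehension scan comparing against it with a single set comprehension that collects the distinct initial letters and tests len <= 1.
import Mathlib
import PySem

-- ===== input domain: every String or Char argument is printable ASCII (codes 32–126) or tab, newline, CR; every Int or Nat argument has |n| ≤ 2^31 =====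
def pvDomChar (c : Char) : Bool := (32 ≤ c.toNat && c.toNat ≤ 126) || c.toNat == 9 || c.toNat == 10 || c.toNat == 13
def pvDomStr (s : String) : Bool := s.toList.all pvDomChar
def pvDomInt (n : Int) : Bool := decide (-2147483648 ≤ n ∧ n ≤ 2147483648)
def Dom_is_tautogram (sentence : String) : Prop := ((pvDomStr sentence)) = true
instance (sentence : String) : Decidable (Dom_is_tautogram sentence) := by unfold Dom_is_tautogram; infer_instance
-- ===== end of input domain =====

-- B replaces A's find-a-reference-letter helper + second comparing scan by one set of distinct
-- initial letters tested for len <= 1 (objective: simpler).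

-- ===== PORT A =====
-- __first_char: loop returning first alphabetic initial letter, or None.
-- word[0] is exact here: split() yields only nonempty words, so pyGet? never returns none;
-- the none branch (Python would raise IndexError) is unreachable and just continues.
def pvFirstCharA : List String → Option Char
  | [] => none
  | w :: ws =>
    match PySem.Str.pyGet? w 0 with
    | some c => if PySem.Chars.isalpha c then some c else pvFirstCharA ws
    | none => pvFirstCharA ws

def is_tautogram (sentence : String) : Bool :=
  let words := PySem.Str.split₀ (PySem.Str.lower sentence)
  let first_character := pvFirstCharA words
  -- all([False for word in words if word[0].isalpha() and word[0] != first_character])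
  (words.foldl (fun acc w =>
      acc ++ (match PySem.Str.pyGet? w 0 with
              | some c => if PySem.Chars.isalpha c && !(some c == first_character) then [false] else []
              | none => [])) []).all id

-- ===== PORT B =====
def is_tautogram_alt (sentence : String) : Bool :=
  -- letters = {word[0] for word in sentence.lower().split() if word[0].isalpha()}
  let letters : PySem.Set Char :=
    PySem.Set.ofList
      (((PySem.Str.split₀ (PySem.Str.lower sentence)).filterMap
          (fun w => PySem.Str.pyGet? w 0)).filter (fun c => PySem.Chars.isalpha c))
  decide (PySem.Set.len letters ≤ 1)

-- ===== PRECONDITION & SPEC =====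
def Spec_is_tautogram (sentence : String) (out : Bool) : Prop := out = is_tautogram_alt sentence
instance (sentence : String) (out : Bool) : Decidable (Spec_is_tautogram sentence out) := by unfold Spec_is_tautogram; infer_instance

-- ===== CLAIM (what is proved, stated in full; the proofs are below) =====
def Claim_equal_is_tautogram : Prop := ∀ (sentence : String), Dom_is_tautogram sentence → Spec_is_tautogram sentence (is_tautogram sentence)

-- ===== LEMMAS AND PROOFS =====

-- the list of initial letters of alpha-starting words
def pvLetters (words : List String) : List Char :=
  (words.filterMap (fun w => PySem.Str.pyGet? w 0)).filter (fun c => PySem.Chars.isalpha c)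

theorem pvLetters_cons_alpha {w : String} {c : Char} (ws : List String)
    (h : PySem.Str.pyGet? w 0 = some c) (hc : PySem.Chars.isalpha c = true) :
    pvLetters (w :: ws) = c :: pvLetters ws := by
  have h' : PySem.List.pyGet? w.toList 0 = some c := by simpa using h
  simp [pvLetters, h', hc]

theorem pvLetters_cons_nonalpha {w : String} {c : Char} (ws : List String)
    (h : PySem.Str.pyGet? w 0 = some c) (hc : PySem.Chars.isalpha c = false) :
    pvLetters (w :: ws) = pvLetters ws := by
  have h' : PySem.List.pyGet? w.toList 0 = some c := by simpa using h
  simp [pvLetters, h', hc]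

theorem pvLetters_cons_none {w : String} (ws : List String)
    (h : PySem.Str.pyGet? w 0 = none) :
    pvLetters (w :: ws) = pvLetters ws := by
  have h' : PySem.List.pyGet? w.toList 0 = none := by simpa using h
  simp [pvLetters, h']

theorem pvFirstCharA_eq_head (words : List String) :
    pvFirstCharA words = (pvLetters words).head? := by
  induction words with
  | nil => rfl
  | cons w ws ih =>
    simp only [pvFirstCharA]
    cases h : PySem.Str.pyGet? w 0 with
    | none => rw [pvLetters_cons_none ws h]; exact ih
    | some c =>
      by_cases hc : PySem.Chars.isalpha c = true
      · rw [pvLetters_cons_alpha ws h hc]; simp [hc]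
      · simp only [Bool.not_eq_true] at hc
        rw [pvLetters_cons_nonalpha ws h hc]; simp [hc, ih]

theorem pvLoopA_eq_all (words : List String) (fc : Option Char) :
    ((words.foldl (fun acc w =>
        acc ++ (match PySem.Str.pyGet? w 0 with
                | some c => if PySem.Chars.isalpha c && !(some c == fc) then [false] else []
                | none => [])) []).all id)
    = (pvLetters words).all (fun c => some c == fc) := by
  rw [PySem.List.foldl_append_eq_flatMap]
  rw [List.nil_append]
  induction words with
  | nil => rfl
  | cons w ws ih =>
    rw [List.flatMap_cons, List.all_append]
    cases h : PySem.Str.pyGet? w 0 with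
    | none =>
      rw [pvLetters_cons_none ws h]
      simpa using ih
    | some c =>
      by_cases hc : PySem.Chars.isalpha c = true
      · rw [pvLetters_cons_alpha ws h hc, List.all_cons]
        by_cases he : (some c == fc) = true
        · simp only [he, Bool.not_true, Bool.and_false, Bool.false_eq_true, if_false,
            List.all_nil, Bool.true_and]
          exact ih
        · simp only [Bool.not_eq_true] at he
          simp [hc, he]
      · simp only [Bool.not_eq_true] at hc
        rw [pvLetters_cons_nonalpha ws h hc]
        simpa [hc] using ih

theorem pvLength_le_foldl_add (rest : List Char) (s : PySem.Set Char) :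
    s.length ≤ (rest.foldl PySem.Set.add s).length := by
  induction rest generalizing s with
  | nil => simp
  | cons x rest ih =>
    simp only [List.foldl_cons]
    refine le_trans ?_ (ih (PySem.Set.add s x))
    simp only [PySem.Set.add]
    split <;> simp

theorem pvAll_eq_len_le (rest : List Char) (c : Char) :
    rest.all (fun x => x == c) = decide ((rest.foldl PySem.Set.add [c]).length ≤ 1) := by
  induction rest with
  | nil => simp
  | cons x rest ih =>
    simp only [List.all_cons, List.foldl_cons]
    by_cases hx : (x == c) = true
    · have hxc : x = c := by simpa using hx
      have hadd : PySem.Set.add [c] x = [c] := by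
        simp [PySem.Set.add, PySem.Set.contains, hxc]
      simp only [hx, hadd, Bool.true_and]
      exact ih
    · simp only [Bool.not_eq_true] at hx
      have hxc : ¬ x = c := by simpa using hx
      have hadd : PySem.Set.add [c] x = [c, x] := by
        simp [PySem.Set.add, PySem.Set.contains, hxc]
      have h2 := pvLength_le_foldl_add rest [c, x]
      simp only [hx, Bool.false_and, hadd]
      have hgt : ¬ ((rest.foldl PySem.Set.add [c, x]).length ≤ 1) := by
        simp only [List.length_cons, List.length_nil] at h2 ⊢; omega
      simp [hgt]

theorem pvCore (L : List Char) :
    L.all (fun c => some c == L.head?) = decide (PySem.Set.len (PySem.Set.ofList L) ≤ 1) := by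
  have hlen : ∀ (s : PySem.Set Char), decide (PySem.Set.len s ≤ 1) = decide (s.length ≤ 1) := by
    intro s
    simp [PySem.Set.len]
  rw [hlen]
  cases L with
  | nil => simp [PySem.Set.ofList]
  | cons c rest =>
    have hof : PySem.Set.ofList (c :: rest) = rest.foldl PySem.Set.add [c] := by
      rw [PySem.Set.ofList_eq_foldl]; rfl
    rw [hof, ← pvAll_eq_len_le]
    simp [List.all_cons]

-- ===== VERDICT (by name: the statement is the Claim_ definition above) =====
theorem is_tautogram_spec : Claim_equal_is_tautogram := by
  intro sentence _
  unfold Spec_is_tautogram is_tautogram is_tautogram_alt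
  simp only
  rw [pvLoopA_eq_all, pvFirstCharA_eq_head]
  exact pvCore _
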